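-- pv_equiv track=rewrite | github.com/Nolan-Olhausen/TLOPOPotionsMaster | MyScripts/brew_core/recovery_automation.py | min_scroll_clicks_to_top
-- ===== SOURCE A (Python) =====
-- from collections import deque
--
-- def scroll_down_new_top(top: int, max_top: int) -> int:
--     """One in-game ``potion_list_down`` click: +2 while possible, else +1 to ``max_top``."""
--     if top >= max_top:
--         return top
--     if top + 2 <= max_top:
--         return top + 2
--     return top + 1
--
-- def min_scroll_clicks_to_top(goal_top: int, max_top: int) -> int | None:
--     """Minimum ``potion_list_down`` clicks to reach ``goal_top`` from list top (0)."""
--     if goal_top < 0 or goal_top > max_top: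
--         return None
--     if goal_top == 0:
--         return 0
--     q: deque[tuple[int, int]] = deque([(0, 0)])
--     seen = {0}
--     while q:
--         top, d = q.popleft()
--         nt = scroll_down_new_top(top, max_top)
--         if nt == goal_top:
--             return d + 1
--         if nt not in seen and nt > top:
--             seen.add(nt)
--             q.append((nt, d + 1))
--     return None
-- ===== SOURCE B (Python) =====
-- def min_scroll_clicks_to_top(goal_top: int, max_top: int) -> int | None:
--     """Closed form: the scroll position after k clicks is min(2*k, max_top),
--     so even goals need goal_top//2 clicks and an odd goal is reachable only
--     when it equals max_top, after (max_top + 1)//2 clicks."""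
--     if goal_top < 0 or goal_top > max_top:
--         return None
--     if goal_top == 0:
--         return 0
--     if goal_top % 2 == 0:
--         return goal_top // 2
--     if goal_top == max_top:
--         return (max_top + 1) // 2
--     return None
-- ===== Notes on version B (the rewrite author's own statement) =====
-- stated objective: faster
-- what changed: Replaced the BFS/deque simulation of scroll clicks with an O(1) closed form: position after k clicks is min(2k, max_top), so an even goal needs goal_top//2 clicks and an odd goal is reachable only when it equals max_top, after (max_top+1)//2 clicks.
import Mathlib
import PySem

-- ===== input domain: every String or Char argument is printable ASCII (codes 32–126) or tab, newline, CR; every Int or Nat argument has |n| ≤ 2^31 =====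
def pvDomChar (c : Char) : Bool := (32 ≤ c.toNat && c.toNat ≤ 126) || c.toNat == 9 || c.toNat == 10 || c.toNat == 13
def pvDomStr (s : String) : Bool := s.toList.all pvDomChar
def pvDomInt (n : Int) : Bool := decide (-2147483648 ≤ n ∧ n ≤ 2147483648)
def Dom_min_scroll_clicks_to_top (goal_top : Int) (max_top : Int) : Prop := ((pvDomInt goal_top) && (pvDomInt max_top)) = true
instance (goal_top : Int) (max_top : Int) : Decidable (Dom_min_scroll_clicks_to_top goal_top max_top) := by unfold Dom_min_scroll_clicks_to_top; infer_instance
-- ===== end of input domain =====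

-- B replaces A's BFS/deque click simulation by an O(1) closed form (position after k clicks is min(2k, max_top)); objective: faster.

-- ===== PORT A =====
def pvScrollDownNewTop (top : Int) (max_top : Int) : Int :=
  if top ≥ max_top then top
  else if top + 2 ≤ max_top then top + 2
  else top + 1

-- the `while q:` loop: queue of (top, d) pairs, `seen` a Python set
def pvLoopA (goal_top : Int) (max_top : Int) : List (Int × Int) → PySem.Set Int → Option Int
  | [], _ => none
  | (top, d) :: rest, seen =>
    let nt := pvScrollDownNewTop top max_top
    if nt = goal_top then some (d + 1)
    else if nt ∉ seen ∧ nt > top then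
      pvLoopA goal_top max_top (rest ++ [(nt, d + 1)]) (PySem.Set.add seen nt)
    else pvLoopA goal_top max_top rest seen
termination_by q _ => (q.map (fun p => (max_top + 2 - p.1).toNat)).sum + q.length
decreasing_by
  · simp only [List.map_append, List.map_cons, List.map_nil, List.sum_append, List.sum_cons,
      List.sum_nil, List.length_append, List.length_cons, List.length_nil]
    rename_i hcond
    have hs : pvScrollDownNewTop top max_top > top := hcond.2
    have hb : top < max_top ∧ pvScrollDownNewTop top max_top ≤ max_top := by
      simp only [pvScrollDownNewTop] at hs ⊢
      split_ifs at hs ⊢ <;> omega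
    omega
  · simp only [List.map_cons, List.sum_cons, List.length_cons]
    omega

def min_scroll_clicks_to_top (goal_top : Int) (max_top : Int) : Option Int :=
  if goal_top < 0 ∨ goal_top > max_top then none
  else if goal_top = 0 then some 0
  else pvLoopA goal_top max_top [(0, 0)] (PySem.Set.ofList [0])

-- ===== PORT B =====
def min_scroll_clicks_to_top_alt (goal_top : Int) (max_top : Int) : Option Int :=
  if goal_top < 0 ∨ goal_top > max_top then none
  else if goal_top = 0 then some 0
  else if PySem.Int.mod goal_top 2 = 0 then some (PySem.Int.floordiv goal_top 2)
  else if goal_top = max_top then some (PySem.Int.floordiv (max_top + 1) 2)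
  else none

-- ===== PRECONDITION & SPEC =====
def Spec_min_scroll_clicks_to_top (goal_top : Int) (max_top : Int) (out : Option Int) : Prop := out = min_scroll_clicks_to_top_alt goal_top max_top
instance (goal_top : Int) (max_top : Int) (out : Option Int) : Decidable (Spec_min_scroll_clicks_to_top goal_top max_top out) := by unfold Spec_min_scroll_clicks_to_top; infer_instance

-- ===== CLAIM (what is proved, stated in full; the proofs are below) =====
def Claim_equal_min_scroll_clicks_to_top : Prop := ∀ (goal_top : Int) (max_top : Int), Dom_min_scroll_clicks_to_top goal_top max_top → Spec_min_scroll_clicks_to_top goal_top max_top (min_scroll_clicks_to_top goal_top max_top)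

-- ===== LEMMAS AND PROOFS =====

-- Once the current top is ≥ goal_top and goal_top < max_top, the loop never hits the goal.
lemma pvLoopA_none (goal_top max_top : Int) (n : Nat) :
    ∀ (top d : Int) (seen : PySem.Set Int), (max_top - top).toNat ≤ n →
      goal_top < max_top → goal_top ≤ top →
      pvLoopA goal_top max_top [(top, d)] seen = none := by
  induction n with
  | zero =>
    intro top d seen hfuel hgm hgt
    rw [pvLoopA]
    have hnt : pvScrollDownNewTop top max_top = top := by
      simp only [pvScrollDownNewTop]; split_ifs <;> omega
    rw [hnt]
    have h1 : ¬ (top = goal_top) := by omega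
    simp only [h1, if_false]
    have h2 : ¬ (top ∉ seen ∧ top > top) := by omega
    simp only [h2, if_false]
    rw [pvLoopA]
  | succ n ih =>
    intro top d seen hfuel hgm hgt
    rw [pvLoopA]
    by_cases hge : top ≥ max_top
    · have hnt : pvScrollDownNewTop top max_top = top := by
        simp only [pvScrollDownNewTop]; split_ifs <;> omega
      rw [hnt]
      have h1 : ¬ (top = goal_top) := by omega
      simp only [h1, if_false]
      have h2 : ¬ (top ∉ seen ∧ top > top) := by omega
      simp only [h2, if_false]
      rw [pvLoopA]
    · set nt := pvScrollDownNewTop top max_top with hntdef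
      have hntv : nt = top + 2 ∨ nt = top + 1 := by
        simp only [hntdef, pvScrollDownNewTop]; split_ifs <;> omega
      have h1 : ¬ (nt = goal_top) := by omega
      simp only [h1, if_false]
      by_cases hmem : nt ∈ seen
      · have h2 : ¬ (nt ∉ seen ∧ nt > top) := by
          intro h; exact h.1 hmem
        simp only [h2, if_false]
        rw [pvLoopA]
      · have h2 : (nt ∉ seen ∧ nt > top) := ⟨hmem, by omega⟩
        rw [if_pos h2]
        simp only [List.nil_append]
        exact ih nt (d + 1) _ (by omega) hgm (by omega)

-- Closed form of the loop from an even state top < goal_top ≤ max_top.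
lemma pvLoopA_some (goal_top max_top : Int) (hg : 0 < goal_top) (hgm : goal_top ≤ max_top) (n : Nat) :
    ∀ (top d : Int) (seen : PySem.Set Int), (max_top - top).toNat ≤ n →
      0 ≤ top → top < goal_top → 2 ∣ top → (∀ s ∈ seen, s ≤ top) →
      pvLoopA goal_top max_top [(top, d)] seen =
        (if 2 ∣ goal_top then some (d + (goal_top - top) / 2)
         else if goal_top = max_top then some (d + (max_top + 1 - top) / 2)
         else none) := by
  induction n with
  | zero => intro top d seen hfuel _ hlt _ _; omega
  | succ n ih =>
    intro top d seen hfuel htop hlt hdvd hseen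
    rw [pvLoopA]
    set nt := pvScrollDownNewTop top max_top with hntdef
    have hntv : (nt = top + 2 ∧ top + 2 ≤ max_top) ∨ (nt = top + 1 ∧ max_top = top + 1) := by
      simp only [hntdef, pvScrollDownNewTop]; split_ifs <;> omega
    by_cases hhit : nt = goal_top
    · simp only [hhit, if_true]
      rcases hntv with ⟨he, _⟩ | ⟨he, hm⟩
      · -- goal_top = top + 2, even
        have h2 : 2 ∣ goal_top := by omega
        simp only [h2, if_true]
        have : (goal_top - top) / 2 = 1 := by omega
        rw [this]
      · -- goal_top = top + 1 = max_top, odd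
        have h2 : ¬ 2 ∣ goal_top := by omega
        have h3 : goal_top = max_top := by omega
        have h4 : (max_top + 1 - top) / 2 = 1 := by omega
        rw [if_neg h2, if_pos h3, h4]
    · simp only [hhit, if_false]
      have hmem : nt ∉ seen := by
        intro hin
        have := hseen nt hin
        omega
      have h2 : (nt ∉ seen ∧ nt > top) := ⟨hmem, by omega⟩
      rw [if_pos h2]
      simp only [List.nil_append]
      have hseen' : ∀ s ∈ PySem.Set.add seen nt, s ≤ nt := by
        intro s hs
        rw [PySem.Set.mem_add] at hs
        rcases hs with hs | hs
        · have := hseen s hs; omega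
        · omega
      rcases hntv with ⟨he, hle⟩ | ⟨he, hm⟩
      · by_cases hpast : nt < goal_top
        · -- still below the goal: step of the chain
          rw [ih nt (d + 1) _ (by omega) (by omega) hpast (by omega) hseen']
          by_cases hev : 2 ∣ goal_top
          · simp only [hev, if_true]
            have : d + 1 + (goal_top - nt) / 2 = d + (goal_top - top) / 2 := by omega
            rw [this]
          · simp only [hev, if_false]
            by_cases hge : goal_top = max_top
            · simp only [hge, if_true]
              have : d + 1 + (max_top + 1 - nt) / 2 = d + (max_top + 1 - top) / 2 := by omega
              rw [this]
            · simp only [hge, if_false]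
        · -- jumped past an odd goal_top = top + 1 < max_top: never reached
          have hodd : ¬ 2 ∣ goal_top := by omega
          have hne : goal_top ≠ max_top := by omega
          rw [pvLoopA_none goal_top max_top n nt (d + 1) _ (by omega) (by omega) (by omega)]
          simp only [hodd, if_false, hne, if_false]
      · -- nt = top + 1 = max_top and nt ≠ goal_top: impossible since top < goal_top ≤ max_top
        omega

-- ===== VERDICT (by name: the statement is the Claim_ definition above) =====
theorem min_scroll_clicks_to_top_spec : Claim_equal_min_scroll_clicks_to_top := by
  unfold Claim_equal_min_scroll_clicks_to_top Spec_min_scroll_clicks_to_top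
  intro goal_top max_top _
  unfold min_scroll_clicks_to_top min_scroll_clicks_to_top_alt
  by_cases h1 : goal_top < 0 ∨ goal_top > max_top
  · simp only [h1, if_true]
  · simp only [h1, if_false]
    by_cases h2 : goal_top = 0
    · simp only [h2, if_true]
    · simp only [h2, if_false]
      have hg : 0 < goal_top := by omega
      have hgm : goal_top ≤ max_top := by omega
      rw [pvLoopA_some goal_top max_top hg hgm max_top.toNat 0 0 (PySem.Set.ofList [0])
        (by omega) (by omega) hg (by omega) (by intro s hs; simp [PySem.Set.ofList] at hs; omega)]
      have hmodiff : PySem.Int.mod goal_top 2 = 0 ↔ 2 ∣ goal_top := PySem.Int.mod_eq_zero_iff_dvd goal_top 2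
      by_cases hev : 2 ∣ goal_top
      · have hm0 : PySem.Int.mod goal_top 2 = 0 := hmodiff.mpr hev
        simp only [hev, if_true, hm0, if_true]
        rw [PySem.Int.floordiv_eq_ediv_of_pos (by omega)]
        norm_num
      · have hm0 : ¬ PySem.Int.mod goal_top 2 = 0 := fun h => hev (hmodiff.mp h)
        simp only [hev, if_false, hm0, if_false]
        by_cases hge : goal_top = max_top
        · simp only [hge, if_true]
          rw [PySem.Int.floordiv_eq_ediv_of_pos (by omega)]
          norm_num
        · simp only [hge, if_false]
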